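-- pv_equiv track=rewrite | github.com/asunson/dwd | clsocp/make_inds.py | make_inds
-- ===== SOURCE A (Python) =====
-- def make_inds(kvec):
--     curr = 0
--     block = 0
--     inds = []
--     while(block < len(kvec)):
--         inds.append(list(range(curr, int((curr + kvec[block])))))
--         curr = int(curr + kvec[block])
--         block += 1
--     return inds
-- ===== SOURCE B (Python) =====
-- def _bounds(v):
--     # divide and conquer: (start, end) pairs for each half built from offset 0,
--     # the right half's pairs shifted by the total size of the left half
--     if len(v) == 0:
--         return []
--     if len(v) == 1:
--         return [(0, int(v[0]))]
--     mid = len(v) // 2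
--     off = sum(v[:mid])
--     return _bounds(v[:mid]) + [(a + off, b + off) for a, b in _bounds(v[mid:])]
--
-- def make_inds(kvec):
--     return [list(range(a, b)) for a, b in _bounds(kvec)]
-- ===== Notes on version B (the rewrite author's own statement) =====
-- stated objective: alternative
-- what changed: Replaces A's sequential accumulate-and-append loop by a divide-and-conquer recursion over (start,end) boundary pairs: each half is built from offset 0, the right half's pairs are shifted by the left half's total size, and the ranges are materialized in one final pass.
import Mathlib
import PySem

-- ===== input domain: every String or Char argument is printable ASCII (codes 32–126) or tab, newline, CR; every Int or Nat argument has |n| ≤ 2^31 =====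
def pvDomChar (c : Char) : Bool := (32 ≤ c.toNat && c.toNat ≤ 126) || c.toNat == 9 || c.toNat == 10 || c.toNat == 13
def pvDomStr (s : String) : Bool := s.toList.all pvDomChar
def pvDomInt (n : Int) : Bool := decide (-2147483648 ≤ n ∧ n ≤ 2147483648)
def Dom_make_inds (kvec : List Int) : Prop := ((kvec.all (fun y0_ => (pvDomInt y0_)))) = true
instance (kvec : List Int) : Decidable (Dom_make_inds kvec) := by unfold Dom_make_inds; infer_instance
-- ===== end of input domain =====

-- B is a divide-and-conquer alternative to A's sequential accumulate-and-append loop: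
-- both halves' boundary pairs are built from offset 0, the right half is shifted, and
-- ranges are materialized in a final pass (objective: alternative).

-- ===== PORT A =====
-- A's while loop over block indices, carrying curr; recursion on the remaining kvec.
def make_inds_loop (curr : Int) (ks : List Int) : List (List Int) :=
  match ks with
  | [] => []
  | k :: rest => PySem.List.pyRange curr (curr + k) 1 :: make_inds_loop (curr + k) rest

def make_inds (kvec : List Int) : List (List Int) := make_inds_loop 0 kvec

-- ===== PORT B =====
-- _bounds: if len==0: []; if len==1: [(0, v[0])]; else split at mid, recurse on
-- both halves and shift the right half's pairs by sum(v[:mid]).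
-- (v[0] on the known-nonempty singleton is ported as headD 0.)
def make_bounds (v : List Int) : List (Int × Int) :=
  if v.length = 0 then []
  else if v.length = 1 then [(0, v.headD 0)]
  else
    let mid := v.length / 2
    make_bounds (v.take mid) ++
      (make_bounds (v.drop mid)).map
        (fun p => (p.1 + (v.take mid).sum, p.2 + (v.take mid).sum))
termination_by v.length
decreasing_by
  · simp only [List.length_take]; omega
  · simp only [List.length_drop]; omega

-- [list(range(a, b)) for a, b in _bounds(kvec)]
def make_inds_alt (kvec : List Int) : List (List Int) :=
  (make_bounds kvec).map (fun p => PySem.List.pyRange p.1 p.2 1)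

-- ===== PRECONDITION & SPEC =====
def Spec_make_inds (kvec : List Int) (out : List (List Int)) : Prop := out = make_inds_alt kvec
instance (kvec : List Int) (out : List (List Int)) : Decidable (Spec_make_inds kvec out) := by unfold Spec_make_inds; infer_instance

-- ===== CLAIM (what is proved, stated in full; the proofs are below) =====
def Claim_equal_make_inds : Prop := ∀ (kvec : List Int), Dom_make_inds kvec → Spec_make_inds kvec (make_inds kvec)

-- ===== LEMMAS AND PROOFS =====

-- the boundary pairs A's loop would produce, starting from curr = c
def loopB (c : Int) (ks : List Int) : List (Int × Int) :=
  match ks with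
  | [] => []
  | k :: rest => (c, c + k) :: loopB (c + k) rest

theorem loopB_shift (ks : List Int) : ∀ (c d : Int),
    loopB (c + d) ks = (loopB c ks).map (fun p => (p.1 + d, p.2 + d)) := by
  induction ks with
  | nil => intro c d; simp [loopB]
  | cons k rest ih =>
      intro c d
      simp only [loopB, List.map]
      have h1 : c + d + k = c + k + d := by ring
      rw [h1, ih (c + k) d]

theorem loopB_append (xs : List Int) : ∀ (ys : List Int) (c : Int),
    loopB c (xs ++ ys) = loopB c xs ++ loopB (c + xs.sum) ys := by
  induction xs with
  | nil => intro ys c; simp [loopB]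
  | cons x rest ih =>
      intro ys c
      simp only [List.cons_append, loopB, List.sum_cons, ih ys (c + x)]
      have h : c + x + rest.sum = c + (x + rest.sum) := by ring
      rw [h]

theorem bounds_eq_loopB : ∀ (n : Nat) (ks : List Int), ks.length ≤ n →
    make_bounds ks = loopB 0 ks := by
  intro n
  induction n with
  | zero =>
      intro ks hks
      have : ks = [] := List.eq_nil_of_length_eq_zero (Nat.le_zero.mp hks)
      subst this
      simp [make_bounds, loopB]
  | succ n ih =>
      intro ks hks
      by_cases h0 : ks.length = 0
      · have : ks = [] := List.eq_nil_of_length_eq_zero h0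
        subst this
        simp [make_bounds, loopB]
      · by_cases h1 : ks.length = 1
        · obtain ⟨k, hk⟩ : ∃ k, ks = [k] := List.length_eq_one_iff.mp h1
          subst hk
          simp [make_bounds, loopB]
        · have h2 : 2 ≤ ks.length := by omega
          rw [make_bounds]
          simp only [h0, h1, if_false]
          rw [ih (ks.take (ks.length / 2)) (by simp [List.length_take]; omega),
              ih (ks.drop (ks.length / 2)) (by simp [List.length_drop]; omega)]
          rw [← loopB_shift (ks.drop (ks.length / 2)) 0 ((ks.take (ks.length / 2)).sum),
              ← loopB_append, List.take_append_drop]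

theorem map_range_loopB (ks : List Int) : ∀ (c : Int),
    (loopB c ks).map (fun p => PySem.List.pyRange p.1 p.2 1) = make_inds_loop c ks := by
  induction ks with
  | nil => intro c; simp [loopB, make_inds_loop]
  | cons k rest ih =>
      intro c
      simp only [loopB, make_inds_loop, List.map]
      exact congrArg _ (ih (c + k))

-- ===== VERDICT (by name: the statement is the Claim_ definition above) =====
theorem make_inds_spec : Claim_equal_make_inds := by
  intro kvec _
  unfold Spec_make_inds make_inds make_inds_alt
  rw [bounds_eq_loopB kvec.length kvec le_rfl]
  exact (map_range_loopB kvec 0).symm
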